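-- pv_equiv track=rewrite | github.com/kshitijalwadhi/COL100 | Major/q1.py | linTomultiple
-- ===== SOURCE A (Python) =====
-- import math
--
-- def linTomultiple(A):
--     n = int(math.sqrt(len(A)))
--     ans = [[0 for i in range(n)] for j in range(n)]
--
--     i = 0
--
--     for p in range(n):
--         for q in range(n):
--             ans[q][p] = A[i]
--             i += 1
--             q += 1
--         p += 1
--
--     return ans
-- ===== SOURCE B (Python) =====
-- import math
--
-- def linTomultiple(A):
--     n = int(math.sqrt(len(A)))
--     M = [A[p * n:(p + 1) * n] for p in range(n)]
--     return [list(t) for t in zip(*M)]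
-- ===== Notes on version B (the rewrite author's own statement) =====
-- stated objective: idiomatic
-- what changed: A fills a preallocated n×n zero matrix cell by cell with an interleaved running counter (ans[q][p] = A[i]); B instead slices A into n row-major chunks and returns their transpose via zip(*M), with no counter, no preallocation and no in-place mutation.
import Mathlib
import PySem

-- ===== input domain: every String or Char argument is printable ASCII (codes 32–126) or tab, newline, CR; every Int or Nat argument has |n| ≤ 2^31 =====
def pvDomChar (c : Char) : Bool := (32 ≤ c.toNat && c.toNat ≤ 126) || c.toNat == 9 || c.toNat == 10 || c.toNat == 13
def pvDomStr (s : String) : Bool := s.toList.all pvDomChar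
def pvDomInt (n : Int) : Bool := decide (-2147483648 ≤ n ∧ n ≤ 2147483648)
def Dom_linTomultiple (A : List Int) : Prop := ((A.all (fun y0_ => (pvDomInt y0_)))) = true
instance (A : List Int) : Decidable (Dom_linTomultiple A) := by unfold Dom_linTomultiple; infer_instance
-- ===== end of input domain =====

-- B replaces A's interleaved counter-driven fill loop with a row-major reshape by slicing followed by a transpose (simpler decomposition, same cost).

-- ===== PORT A =====
-- literal port of A: n = int(sqrt(len(A))); n×n zero matrix; nested loop writing ans[q][p] = A[i], i += 1
def linTomultiple (A : List Int) : List (List Int) :=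
  let n := Nat.sqrt A.length
  let ans : List (List Int) := (List.range n).map (fun _ => (List.range n).map (fun _ => (0 : Int)))
  let st := (List.range n).foldl (fun (st : List (List Int) × Nat) (p : Nat) =>
    (List.range n).foldl (fun (st : List (List Int) × Nat) (q : Nat) =>
      (PySem.List.pySetD st.1 (q : Int)
        (PySem.List.pySetD (PySem.List.pyGetD st.1 (q : Int) []) (p : Int)
          (PySem.List.pyGetD A (st.2 : Int) 0)),
       st.2 + 1)) st) (ans, 0)
  st.1

-- ===== PORT B =====
-- transcription of zip(*rows): stop at the first exhausted row, emit the heads, recurse on the tails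
def pvZipStar (rows : List (List Int)) : List (List Int) :=
  if rows = [] ∨ rows.any (fun r => r.isEmpty) then []
  else (rows.map (fun r => r.headD 0)) :: pvZipStar (rows.map (fun r => r.tail))
termination_by (rows.headD []).length
decreasing_by
  rename_i h
  cases rows with
  | nil => exact absurd (Or.inl rfl) h
  | cons r rs =>
    have hr : r ≠ [] := by
      intro hre
      exact h (Or.inr (by simp [hre]))
    cases r with
    | nil => exact absurd rfl hr
    | cons a as => simp

-- literal port of B: n = int(sqrt(len(A))); M = [A[p*n:(p+1)*n] for p in range(n)]; return zip(*M) as lists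
def linTomultiple_alt (A : List Int) : List (List Int) :=
  let n := Nat.sqrt A.length
  let M := (List.range n).map (fun (p : Nat) =>
    PySem.List.slice A (some ((p : Int) * (n : Int))) (some (((p : Int) + 1) * (n : Int))))
  pvZipStar M

-- ===== PRECONDITION & SPEC =====
def Spec_linTomultiple (A : List Int) (out : List (List Int)) : Prop := out = linTomultiple_alt A
instance (A : List Int) (out : List (List Int)) : Decidable (Spec_linTomultiple A out) := by unfold Spec_linTomultiple; infer_instance

-- ===== CLAIM (what is proved, stated in full; the proofs are below) =====
def Claim_equal_linTomultiple : Prop := ∀ (A : List Int), Dom_linTomultiple A → Spec_linTomultiple A (linTomultiple A)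

-- ===== LEMMAS AND PROOFS =====

-- the common target: row q, column c holds A[c*n+q]
def pvT (A : List Int) (n : Nat) : List (List Int) :=
  (List.range n).map (fun q => (List.range n).map (fun c => A.getD (c * n + q) 0))

-- transpose of a rectangular range-map matrix (n rows, m columns, n > 0)
theorem pvZipStar_map_range (n : Nat) (hn : 0 < n) :
    ∀ (m : Nat) (f : Nat → Nat → Int),
    pvZipStar ((List.range n).map (fun p => (List.range m).map (fun q => f p q)))
      = (List.range m).map (fun q => (List.range n).map (fun p => f p q)) := by
  intro m
  induction m with
  | zero =>
    intro f
    rw [pvZipStar, if_pos]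
    · simp
    · right
      rw [List.any_eq_true]
      refine ⟨[], ?_, rfl⟩
      exact List.mem_map.mpr ⟨0, List.mem_range.mpr hn, by simp⟩
  | succ m ih =>
    intro f
    rw [pvZipStar]
    have hcond : ¬ (((List.range n).map (fun p => (List.range (m+1)).map (fun q => f p q))) = []
        ∨ ((List.range n).map (fun p => (List.range (m+1)).map (fun q => f p q))).any
            (fun r => r.isEmpty) = true) := by
      rintro (he | ha)
      · rw [List.map_eq_nil_iff, List.range_eq_nil] at he
        omega
      · rw [List.any_eq_true] at ha
        obtain ⟨x, hx, hxe⟩ := ha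
        obtain ⟨p, _, rfl⟩ := List.mem_map.mp hx
        simp at hxe
    rw [if_neg hcond]
    have hheads : (((List.range n).map (fun p => (List.range (m+1)).map (fun q => f p q))).map
        (fun r => r.headD 0)) = (List.range n).map (fun p => f p 0) := by
      simp [List.map_map, List.range_succ_eq_map, Function.comp]
    have htails : (((List.range n).map (fun p => (List.range (m+1)).map (fun q => f p q))).map
        (fun r => r.tail)) = (List.range n).map (fun p => (List.range m).map (fun q => f p (q+1))) := by
      simp [List.map_map, List.range_succ_eq_map, Function.comp]
    rw [hheads, htails, ih (fun p q => f p (q+1))]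
    rw [List.range_succ_eq_map]
    simp [List.map_map, Function.comp]

-- a slice of length n inside A, written out elementwise
theorem pv_slice_eq_map (A : List Int) (a n : Nat) (h : a + n ≤ A.length) :
    (A.drop a).take n = (List.range n).map (fun q => A.getD (a + q) 0) := by
  apply List.ext_getElem
  · simp; omega
  · intro i h1 h2
    simp only [List.getElem_take, List.getElem_drop, List.getElem_map, List.getElem_range]
    have hi : i < n := by simpa using h2
    rw [List.getD_eq_getElem A 0 (by omega)]

theorem pvB_eq_T (A : List Int) : linTomultiple_alt A = pvT A (Nat.sqrt A.length) := by
  simp only [linTomultiple_alt, pvT]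
  obtain ⟨n, hg⟩ : ∃ n, Nat.sqrt A.length = n := ⟨_, rfl⟩
  rw [hg]
  have hnn : n * n ≤ A.length := by
    rw [← hg, ← pow_two]
    exact Nat.sqrt_le' A.length
  have hM : ((List.range n).map (fun (p : Nat) =>
      PySem.List.slice A (some ((p : Int) * (n : Int))) (some (((p : Int) + 1) * (n : Int)))))
      = (List.range n).map (fun p => (List.range n).map (fun q => A.getD (p * n + q) 0)) := by
    apply List.map_congr_left
    intro p hp
    have hp' : p < n := List.mem_range.mp hp
    have h1 : ((p : Int) * (n : Int)) = ((p * n : Nat) : Int) := by push_cast; ring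
    have h2 : (((p : Int) + 1) * (n : Int)) = ((p * n + n : Nat) : Int) := by push_cast; ring
    rw [h1, h2, PySem.List.slice_natCast]
    have h3 : p * n + n - p * n = n := by omega
    rw [h3, pv_slice_eq_map A (p * n) n (by nlinarith)]
  rw [hM]
  rcases Nat.eq_zero_or_pos n with h0 | h0
  · subst h0
    rw [pvZipStar]
    simp
  · exact pvZipStar_map_range n h0 n (fun p q => A.getD (p * n + q) 0)

-- ===== A-side: characterise the nested fill loop =====

-- one outer iteration: set column p of every row, reading A at i, i+1, ..., i+n-1
def pvC (A : List Int) (n : Nat) (m : List (List Int)) (p i : Nat) : List (List Int) :=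
  (List.range' 0 n).foldl (fun mm q => mm.set q ((mm.getD q []).set p (A.getD (i + q) 0))) m

def pvStep (A : List Int) (n : Nat) : (List (List Int) × Nat) → Nat → (List (List Int) × Nat) :=
  fun st p => (pvC A n st.1 p st.2, st.2 + n)

-- the inner loop: split the running counter i off the fold state
theorem pv_inner_fold (A : List Int) (p : Nat) :
    ∀ (k s : Nat) (m : List (List Int)) (i : Nat),
    (List.range' s k).foldl (fun (st : List (List Int) × Nat) q =>
        (st.1.set q ((st.1.getD q []).set p (A.getD st.2 0)), st.2 + 1)) (m, i)
      = ((List.range' s k).foldl (fun mm q => mm.set q ((mm.getD q []).set p (A.getD (i + (q - s)) 0))) m,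
         i + k) := by
  intro k
  induction k with
  | zero => intro s m i; simp
  | succ k ih =>
    intro s m i
    rw [List.range'_succ]
    simp only [List.foldl_cons]
    rw [ih (s+1) _ (i+1)]
    refine Prod.ext ?_ (by omega)
    simp only [Nat.sub_self, Nat.add_zero]
    apply PySem.List.foldl_congr_mem
    intro acc x hx
    have hxs : s + 1 ≤ x := (List.mem_range'_1.mp hx).1
    have h : i + 1 + (x - (s + 1)) = i + (x - s) := by omega
    rw [h]

-- elementwise effect of the column-update fold
theorem pv_colFold_getElem? (p : Nat) (v : Nat → Int) :
    ∀ (k s : Nat) (m : List (List Int)) (j : Nat),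
    ((List.range' s k).foldl (fun mm q => mm.set q ((mm.getD q []).set p (v q))) m)[j]?
      = if s ≤ j ∧ j < s + k then m[j]?.map (fun row => row.set p (v j)) else m[j]? := by
  intro k
  induction k with
  | zero =>
    intro s m j
    have h : ¬ (s ≤ j ∧ j < s + 0) := by omega
    simp only [List.range'_zero, List.foldl_nil, if_neg h]
  | succ k ih =>
    intro s m j
    rw [List.range'_succ]
    simp only [List.foldl_cons]
    rw [ih (s+1)]
    simp only [List.getElem?_set]
    by_cases hj : j = s
    · subst hj
      have h1 : ¬ (j + 1 ≤ j ∧ j < j + 1 + k) := by omega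
      have h2 : j ≤ j ∧ j < j + (k + 1) := by omega
      simp only [if_neg h1, if_pos h2]
      by_cases hlen : j < m.length
      · rw [if_pos hlen, List.getElem?_eq_getElem hlen, List.getD_eq_getElem m [] hlen]
        simp
      · rw [if_neg hlen, List.getElem?_eq_none (show m.length ≤ j by omega)]
        simp
    · have hne : ¬ s = j := fun h => hj h.symm
      simp only [if_neg hne]
      by_cases hr : s + 1 ≤ j ∧ j < s + 1 + k
      · simp only [if_pos hr, if_pos (show s ≤ j ∧ j < s + (k + 1) by omega)]
      · simp only [if_neg hr, if_neg (show ¬ (s ≤ j ∧ j < s + (k + 1)) by omega)]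

-- elementwise effect of filling one row at positions s..s+k-1
theorem pv_rowFold_getElem? (w : Nat → Int) :
    ∀ (k s : Nat) (row : List Int) (c : Nat),
    ((List.range' s k).foldl (fun row p => row.set p (w p)) row)[c]?
      = if s ≤ c ∧ c < s + k ∧ c < row.length then some (w c) else row[c]? := by
  intro k
  induction k with
  | zero =>
    intro s row c
    have h : ¬ (s ≤ c ∧ c < s + 0 ∧ c < row.length) := by omega
    simp only [List.range'_zero, List.foldl_nil, if_neg h]
  | succ k ih =>
    intro s row c
    rw [List.range'_succ]
    simp only [List.foldl_cons]
    rw [ih (s+1)]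
    simp only [List.length_set, List.getElem?_set]
    by_cases hc : c = s
    · subst hc
      have h1 : ¬ (c + 1 ≤ c ∧ c < c + 1 + k ∧ c < row.length) := by omega
      simp only [if_neg h1]
      by_cases hlen : c < row.length
      · rw [if_pos (show c ≤ c ∧ c < c + (k + 1) ∧ c < row.length by omega)]
        simp [hlen]
      · rw [if_neg (show ¬ (c ≤ c ∧ c < c + (k + 1) ∧ c < row.length) by omega),
            List.getElem?_eq_none (show row.length ≤ c by omega)]
        simp [hlen]
    · have hne : ¬ s = c := fun h => hc h.symm
      simp only [if_neg hne]
      by_cases hr : s + 1 ≤ c ∧ c < s + 1 + k ∧ c < row.length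
      · simp only [if_pos hr, if_pos (show s ≤ c ∧ c < s + (k + 1) ∧ c < row.length by omega)]
      · simp only [if_neg hr, if_neg (show ¬ (s ≤ c ∧ c < s + (k + 1) ∧ c < row.length) by omega)]

-- the outer loop: the final counter and row j of the resulting matrix
theorem pv_outer_fold (A : List Int) (n : Nat) :
    ∀ (r t : Nat) (m : List (List Int)) (i : Nat),
    ((List.range' t r).foldl (pvStep A n) (m, i)).2 = i + r * n ∧
    ∀ (j : Nat),
    (((List.range' t r).foldl (pvStep A n) (m, i)).1)[j]?
      = if j < n then
          m[j]?.map (fun row =>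
            (List.range' t r).foldl (fun row p => row.set p (A.getD (i + (p - t) * n + j) 0)) row)
        else m[j]? := by
  intro r
  induction r with
  | zero =>
    intro t m i
    refine ⟨by simp, ?_⟩
    intro j
    simp only [List.range'_zero, List.foldl_nil]
    split <;> simp
  | succ r ih =>
    intro t m i
    rw [List.range'_succ]
    simp only [List.foldl_cons]
    rw [show pvStep A n (m, i) t = (pvC A n m t i, i + n) from rfl]
    obtain ⟨ihc, ihe⟩ := ih (t+1) (pvC A n m t i) (i + n)
    constructor
    · rw [ihc]
      ring
    · intro j
      rw [ihe j]
      by_cases hjn : j < n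
      · rw [if_pos hjn, if_pos hjn]
        unfold pvC
        rw [pv_colFold_getElem? t (fun q => A.getD (i + q) 0) n 0 m j,
            if_pos ⟨Nat.zero_le j, by omega⟩, Option.map_map]
        refine congrFun (congrArg Option.map ?_) _
        funext row
        simp only [Function.comp, Nat.sub_self, Nat.zero_mul, Nat.add_zero]
        apply PySem.List.foldl_congr_mem
        intro acc x hx
        have hxs : t + 1 ≤ x := (List.mem_range'_1.mp hx).1
        have h : i + n + (x - (t + 1)) * n + j = i + (x - t) * n + j := by
          have hx' : x - t = (x - (t + 1)) + 1 := by omega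
          rw [hx']
          ring_nf
        rw [h]
      · rw [if_neg hjn, if_neg hjn]
        unfold pvC
        rw [pv_colFold_getElem? t (fun q => A.getD (i + q) 0) n 0 m j,
            if_neg (show ¬ (0 ≤ j ∧ j < 0 + n) by omega)]

theorem pvA_eq_T (A : List Int) : linTomultiple A = pvT A (Nat.sqrt A.length) := by
  simp only [linTomultiple, PySem.List.pySetD_natCast, PySem.List.pyGetD_natCast]
  obtain ⟨n, hg⟩ : ∃ n, Nat.sqrt A.length = n := ⟨_, rfl⟩
  rw [hg]
  have hstep : (fun (st : List (List Int) × Nat) (p : Nat) =>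
      (List.range n).foldl (fun (st : List (List Int) × Nat) (q : Nat) =>
        (st.1.set q ((st.1.getD q []).set p (A.getD st.2 0)), st.2 + 1)) st) = pvStep A n := by
    funext st p
    rw [List.range_eq_range']
    rcases st with ⟨m, i⟩
    rw [pv_inner_fold A p n 0 m i]
    rfl
  rw [hstep]
  have hfold : List.foldl (pvStep A n)
      ((List.range n).map (fun _ => (List.range n).map (fun _ => (0 : Int))), 0) (List.range n)
      = List.foldl (pvStep A n)
      ((List.range n).map (fun _ => (List.range n).map (fun _ => (0 : Int))), 0) (List.range' 0 n) := by
    rw [List.range_eq_range']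
  rw [hfold]
  obtain ⟨_, he⟩ := pv_outer_fold A n n 0
    ((List.range n).map (fun _ => (List.range n).map (fun _ => (0 : Int)))) 0
  apply List.ext_getElem?
  intro j
  rw [he j]
  by_cases hjn : j < n
  · rw [if_pos hjn]
    have hm0 : ((List.range n).map (fun _ => (List.range n).map (fun _ => (0 : Int))))[j]?
        = some ((List.range n).map (fun _ => (0 : Int))) := by
      rw [List.getElem?_map, List.getElem?_range hjn, Option.map_some]
    have hT : (pvT A n)[j]? = some ((List.range n).map (fun c => A.getD (c * n + j) 0)) := by
      unfold pvT
      rw [List.getElem?_map, List.getElem?_range hjn, Option.map_some]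
    rw [hm0, hT, Option.map_some]
    apply congrArg
    apply List.ext_getElem?
    intro c
    rw [pv_rowFold_getElem? (fun p => A.getD (0 + (p - 0) * n + j) 0) n 0
        ((List.range n).map (fun _ => (0 : Int))) c]
    simp only [List.length_map, List.length_range]
    by_cases hcn : c < n
    · rw [if_pos (show 0 ≤ c ∧ c < 0 + n ∧ c < n by omega),
          List.getElem?_map, List.getElem?_range hcn, Option.map_some]
      simp
    · have hnone : (List.range n)[c]? = none :=
        List.getElem?_eq_none (by simpa using (show n ≤ c by omega))
      rw [if_neg (show ¬ (0 ≤ c ∧ c < 0 + n ∧ c < n) by omega),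
          List.getElem?_map, List.getElem?_map, hnone]
      rfl
  · rw [if_neg hjn]
    have hnone : (List.range n)[j]? = none :=
      List.getElem?_eq_none (by simpa using (show n ≤ j by omega))
    unfold pvT
    rw [List.getElem?_map, List.getElem?_map, hnone]
    rfl

-- ===== VERDICT (by name: the statement is the Claim_ definition above) =====
theorem linTomultiple_spec : Claim_equal_linTomultiple := by
  intro A _
  unfold Spec_linTomultiple
  rw [pvA_eq_T, pvB_eq_T]
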